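-- pv_equiv track=rewrite | github.com/bhagavadgitadu22/theBIGbam | thebigbam/analysis/mapping_patterns_per_CDS_per_contig_per_sample.py | _build_gene_names
-- ===== SOURCE A (Python) =====
-- from collections import defaultdict
--
-- def _build_gene_names(genes, contig_info):
--     """Assign <contig_name>_tbb_<N> names to CDS features, numbered per contig by Start."""
--     counter = defaultdict(int)
--     names = []
--     for g in genes:
--         contig_id = g[0]
--         contig_name = contig_info[contig_id][0]
--         counter[contig_id] += 1
--         names.append(f"{contig_name}_tbb_{counter[contig_id]}")
--     return names
-- ===== SOURCE B (Python) =====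
-- def _build_gene_names(genes, contig_info):
--     """Assign <contig_name>_tbb_<N> names to CDS features, numbered per contig by Start."""
--     positions = {}
--     for i, g in enumerate(genes):
--         positions.setdefault(g[0], []).append(i)
--     names = [None] * len(genes)
--     for contig_id, idxs in positions.items():
--         contig_name = contig_info[contig_id][0]
--         for n, pos in enumerate(idxs, 1):
--             names[pos] = f"{contig_name}_tbb_{n}"
--     return names
-- ===== Notes on version B (the rewrite author's own statement) =====
-- stated objective: alternative
-- what changed: Replaces the single running-counter scan with a two-stage grouped pass: first build an index table contig_id -> list of positions, then number each group 1..k and scatter the names into a preallocated positional list; contig_info is looked up once per contig instead of once per gene.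
import Mathlib
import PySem

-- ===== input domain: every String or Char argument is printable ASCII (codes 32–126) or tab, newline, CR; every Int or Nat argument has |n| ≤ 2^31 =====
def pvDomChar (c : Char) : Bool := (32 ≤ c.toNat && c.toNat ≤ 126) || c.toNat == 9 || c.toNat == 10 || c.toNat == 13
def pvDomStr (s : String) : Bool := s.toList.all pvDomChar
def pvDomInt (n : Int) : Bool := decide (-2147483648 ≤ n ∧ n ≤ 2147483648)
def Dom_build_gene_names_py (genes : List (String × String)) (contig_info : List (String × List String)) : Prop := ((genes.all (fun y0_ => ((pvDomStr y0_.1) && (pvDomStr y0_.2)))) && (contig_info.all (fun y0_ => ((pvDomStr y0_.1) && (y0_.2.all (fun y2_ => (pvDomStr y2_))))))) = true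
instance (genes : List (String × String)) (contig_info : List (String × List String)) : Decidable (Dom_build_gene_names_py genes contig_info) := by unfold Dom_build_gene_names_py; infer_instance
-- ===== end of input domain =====

-- B replaces A's single running-counter scan by a two-stage grouped pass (index table per contig, then positional scatter of numbered names); alternative decomposition, not faster.


-- ===== PORT A =====
-- contig_info[contig_id][0]: first-match dict lookup, then index 0 (exact under Pre_, which rules out the KeyError/IndexError cases)
def pvA_name0 (contig_info : List (String × List String)) (c : String) : String :=
  (PySem.List.pyGet? (((contig_info.find? (fun q => q.1 == c)).map (·.2)).getD []) 0).getD ""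

def build_gene_names_py (genes : List (String × String)) (contig_info : List (String × List String)) : List String :=
  (genes.foldl
    (fun (st : PySem.Dict String Int × List String) g =>
      let contig_id := g.1
      let contig_name := pvA_name0 contig_info contig_id
      let counter := st.1.modify contig_id 0 (· + 1)
      (counter, st.2 ++ [contig_name ++ "_tbb_" ++ PySem.Int.toStr (counter.getD contig_id 0)]))
    (PySem.Dict.empty, [])).2

-- ===== PORT B =====
def pvB_name0 (contig_info : List (String × List String)) (c : String) : String :=
  (PySem.List.pyGet? (((contig_info.find? (fun q => q.1 == c)).map (·.2)).getD []) 0).getD ""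

def build_gene_names_py_alt (genes : List (String × String)) (contig_info : List (String × List String)) : List String :=
  -- pass 1: positions[g[0]].append(i) over enumerate(genes); the list indices are the Nats 0..len-1
  let positions : PySem.Dict String (List Nat) :=
    genes.zipIdx.foldl (fun d q => d.modify q.1.1 [] (· ++ [q.2])) PySem.Dict.empty
  -- names = [None] * len(genes): "" is the placeholder; every slot is written exactly once below
  let names0 : List String := List.replicate genes.length ""
  -- pass 2: for contig_id, idxs in positions.items(): one name lookup, then scatter numbered names
  positions.items.foldl
    (fun names kv =>
      let contig_name := pvB_name0 contig_info kv.1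
      (kv.2.zipIdx 1).foldl
        (fun nm np => nm.set np.1 (contig_name ++ "_tbb_" ++ PySem.Int.toStr (np.2 : Int))) names)
    names0

-- ===== PRECONDITION & SPEC =====
-- Pre_ excludes exactly the inputs where A raises: a gene whose contig_id is missing from
-- contig_info (KeyError) or maps to an empty list (IndexError on [0]).
def Pre_build_gene_names_py (genes : List (String × String)) (contig_info : List (String × List String)) : Prop :=
  ∀ g ∈ genes, ((contig_info.find? (fun q => q.1 == g.1)).map (·.2)).getD [] ≠ []
instance (genes : List (String × String)) (contig_info : List (String × List String)) : Decidable (Pre_build_gene_names_py genes contig_info) := by unfold Pre_build_gene_names_py; infer_instance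

def pvWitness_build_gene_names_py : (List (String × String)) × (List (String × List String)) :=
  ([("c1", "10"), ("c2", "20"), ("c1", "30")], [("c1", ["alpha"]), ("c2", ["beta", "x"])])

def Spec_build_gene_names_py (genes : List (String × String)) (contig_info : List (String × List String)) (out : List String) : Prop := out = build_gene_names_py_alt genes contig_info
instance (genes : List (String × String)) (contig_info : List (String × List String)) (out : List String) : Decidable (Spec_build_gene_names_py genes contig_info out) := by unfold Spec_build_gene_names_py; infer_instance

-- ===== CLAIM (what is proved, stated in full; the proofs are below) =====
def Claim_equal_build_gene_names_py : Prop := ∀ (genes : List (String × String)) (contig_info : List (String × List String)), Dom_build_gene_names_py genes contig_info → Pre_build_gene_names_py genes contig_info → Spec_build_gene_names_py genes contig_info (build_gene_names_py genes contig_info)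

-- ===== LEMMAS AND PROOFS =====

-- common specification of A's loop: name each id by (count of it in the prefix before it) + 1
def pvNm (contig_info : List (String × List String)) : List String → List String → List String
  | _, [] => []
  | pre, c :: rest =>
      (pvA_name0 contig_info c ++ "_tbb_" ++ PySem.Int.toStr ((pre.count c : Int) + 1))
        :: pvNm contig_info (pre ++ [c]) rest

theorem pvA_loop (contig_info : List (String × List String)) :
    ∀ (gs : List (String × String)) (pre acc : List String) (d : PySem.Dict String Int),
    (∀ c, d.getD c 0 = (pre.count c : Int)) →
    (gs.foldl
      (fun (st : PySem.Dict String Int × List String) g =>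
        let contig_id := g.1
        let contig_name := pvA_name0 contig_info contig_id
        let counter := st.1.modify contig_id 0 (· + 1)
        (counter, st.2 ++ [contig_name ++ "_tbb_" ++ PySem.Int.toStr (counter.getD contig_id 0)]))
      (d, acc)).2 = acc ++ pvNm contig_info pre (gs.map (fun g => g.1)) := by
  intro gs
  induction gs with
  | nil => intro pre acc d _; simp [pvNm]
  | cons g rest ih =>
    intro pre acc d hd
    have hmod : ∀ c, (d.modify g.1 0 (· + 1)).getD c 0 = ((pre ++ [g.1]).count c : Int) := by
      intro c
      have h1 : ([g.1].foldl (fun (dd : PySem.Dict String Int) x => dd.modify x 0 (· + 1)) d).getD c 0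
          = d.getD c 0 + ([g.1].count c : Int) := PySem.Dict.getD_foldl_modify_add_one _ _ _
      simp only [List.foldl] at h1
      rw [h1, hd c, List.count_append]
      push_cast; ring
    simp only [List.foldl, List.map]
    rw [ih (pre ++ [g.1]) _ _ hmod]
    simp [pvNm, hmod g.1, List.count_append]

-- A-result characterized positionally
theorem pvNm_getElem? (contig_info : List (String × List String)) :
    ∀ (rest pre : List String) (k : Nat),
    (pvNm contig_info pre rest)[k]? =
      (rest[k]?).map (fun c => pvA_name0 contig_info c ++ "_tbb_" ++
        PySem.Int.toStr (((pre ++ rest.take k).count c : Int) + 1)) := by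
  intro rest
  induction rest with
  | nil => intro pre k; simp [pvNm]
  | cons c rest ih =>
    intro pre k
    cases k with
    | zero => simp [pvNm]
    | succ k =>
      simp only [pvNm, List.getElem?_cons_succ, ih (pre ++ [c]) k, List.take_succ_cons]
      cases rest[k]? with
      | none => rfl
      | some x =>
        simp only [Option.map_some, Option.some.injEq]
        have : (pre ++ [c] ++ rest.take k).count x = (pre ++ c :: rest.take k).count x := by
          simp [List.count_append, List.count_cons]
        rw [this]

-- the per-contig index lists B builds: positions of c among ids, offset s
def pvGrp (ids : List String) (c : String) (s : Nat) : List Nat :=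
  ((ids.zipIdx s).filter (fun p => p.1 == c)).map (·.2)

theorem pvGrp_cons (x : String) (t : List String) (c : String) (s : Nat) :
    pvGrp (x :: t) c s = (if x == c then [s] else []) ++ pvGrp t c (s + 1) := by
  simp only [pvGrp, List.zipIdx_cons, List.filter_cons]
  split <;> simp

theorem pvGrp_bounds (c : String) :
    ∀ (ids : List String) (s p : Nat), p ∈ pvGrp ids c s → s ≤ p ∧ p < s + ids.length := by
  intro ids
  induction ids with
  | nil => intro s p h; simp [pvGrp] at h
  | cons x t ih =>
    intro s p h
    rw [pvGrp_cons] at h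
    rcases List.mem_append.1 h with h | h
    · split at h
      · simp at h
        subst h
        simp only [List.length_cons]
        omega
      · simp at h
    · have := ih (s + 1) p h
      simp only [List.length_cons]
      omega

theorem pvGrp_nodup (c : String) :
    ∀ (ids : List String) (s : Nat), (pvGrp ids c s).Nodup := by
  intro ids
  induction ids with
  | nil => intro s; simp [pvGrp]
  | cons x t ih =>
    intro s
    rw [pvGrp_cons]
    split
    · simp only [List.nodup_append, List.nodup_cons]
      refine ⟨by simp, ih (s + 1), ?_⟩
      intro a ha b hb
      have := pvGrp_bounds c t (s + 1) b hb
      simp at ha; omega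
    · simpa using ih (s + 1)

theorem pvGrp_mem_iff (c : String) :
    ∀ (ids : List String) (s j : Nat) (hj : j < ids.length),
    ((s + j) ∈ pvGrp ids c s ↔ ids[j] = c) := by
  intro ids
  induction ids with
  | nil => intro s j hj; simp at hj
  | cons x t ih =>
    intro s j hj
    rw [pvGrp_cons]
    cases j with
    | zero =>
      simp only [Nat.add_zero, List.mem_append, List.getElem_cons_zero]
      constructor
      · rintro (h | h)
        · split at h <;> simp_all
        · have := pvGrp_bounds c t (s + 1) s h; omega
      · intro h; left; simp [h]
    | succ j =>
      have hj' : j < t.length := by simpa using hj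
      have : s + (j + 1) = (s + 1) + j := by omega
      rw [this, List.mem_append, ih (s + 1) j hj']
      simp only [List.getElem_cons_succ]
      constructor
      · rintro (h | h)
        · split at h
          · simp at h; omega
          · simp at h
        · exact h
      · intro h; right; exact h

theorem pvGrp_idxOf (c : String) :
    ∀ (ids : List String) (s j : Nat) (hj : j < ids.length), ids[j] = c →
    (pvGrp ids c s).idxOf (s + j) = (ids.take j).count c := by
  intro ids
  induction ids with
  | nil => intro s j hj; simp at hj
  | cons x t ih =>
    intro s j hj hc
    rw [pvGrp_cons]
    cases j with
    | zero =>
      simp only [List.getElem_cons_zero] at hc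
      simp [hc]
    | succ j =>
      have hj' : j < t.length := by simpa using hj
      simp only [List.getElem_cons_succ] at hc
      have hsj : s + (j + 1) = (s + 1) + j := by omega
      by_cases hx : x = c
      · have hne : ((s : Nat) == s + (j + 1)) = false := by
          simp only [beq_eq_false_iff_ne]; omega
        simp only [hx, beq_self_eq_true, if_true, List.singleton_append, List.idxOf_cons, hne,
          cond_false, List.take_succ_cons]
        rw [hsj, ih (s + 1) j hj' hc, List.count_cons_self]
      · have hxb : (x == c) = false := by simp [hx]
        simp only [hxb, Bool.false_eq_true, if_false, List.nil_append, List.take_succ_cons]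
        rw [hsj, ih (s + 1) j hj' hc, List.count_cons_of_ne (by simp [Ne.symm, hx])]

-- generic scatter: writing v(s+rank) at each index of a duplicate-free in-range index list
theorem pvScatter (v : Nat → String) :
    ∀ (idxs : List Nat) (s : Nat) (L : List String), idxs.Nodup → (∀ p ∈ idxs, p < L.length) →
    ((idxs.zipIdx s).foldl (fun nm np => nm.set np.1 (v np.2)) L).length = L.length ∧
    ∀ k, ((idxs.zipIdx s).foldl (fun nm np => nm.set np.1 (v np.2)) L)[k]? =
      if k ∈ idxs then some (v (s + idxs.idxOf k)) else L[k]? := by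
  intro idxs
  induction idxs with
  | nil => intro s L _ _; simp
  | cons p rest ih =>
    intro s L hnd hbd
    have hp : p < L.length := hbd p (by simp)
    have hnd' : rest.Nodup := (List.nodup_cons.1 hnd).2
    have hpn : p ∉ rest := (List.nodup_cons.1 hnd).1
    have hbd' : ∀ q ∈ rest, q < (L.set p (v s)).length := by
      intro q hq; rw [List.length_set]; exact hbd q (by simp [hq])
    obtain ⟨ihlen, ihget⟩ := ih (s + 1) (L.set p (v s)) hnd' hbd'
    rw [List.zipIdx_cons]
    simp only [List.foldl_cons]
    refine ⟨by rw [ihlen, List.length_set], ?_⟩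
    intro k
    rw [ihget k]
    by_cases hkr : k ∈ rest
    · have hkp : p ≠ k := fun h => hpn (h ▸ hkr)
      simp only [hkr, if_true, List.mem_cons, or_true, List.idxOf_cons,
        show (p == k) = false by simp [hkp], cond_false]
      rw [show s + (rest.idxOf k + 1) = s + 1 + rest.idxOf k by omega]
    · by_cases hkp : k = p
      · subst hkp
        simp only [hkr, if_false, List.mem_cons, true_or, if_true, List.idxOf_cons,
          beq_self_eq_true, cond_true, Nat.add_zero]
        rw [List.getElem?_set_self]
        simp [hp]
      · rw [if_neg hkr, if_neg (by simp [List.mem_cons]; exact ⟨hkp, hkr⟩)]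
        exact List.getElem?_set_ne (fun h => hkp h.symm)

-- the positions dict B builds, characterized
theorem pvPositions_getD (genes : List (String × String)) (c : String) :
    (genes.zipIdx.foldl (fun d q => d.modify q.1.1 [] (· ++ [q.2])) PySem.Dict.empty).getD c []
      = pvGrp (genes.map (·.1)) c 0 := by
  have h := PySem.Dict.getD_foldl_modify_append
      (genes.zipIdx.map (fun q => (q.1.1, q.2))) (PySem.Dict.empty) c
  rw [List.foldl_map] at h
  simp only [PySem.Dict.getD_empty, List.nil_append] at h
  rw [h, pvGrp]
  conv_rhs => rw [List.zipIdx_map]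
  simp [List.filter_map, List.map_map, Function.comp_def, Prod.map]

theorem pvPositions_items (genes : List (String × String)) :
    (genes.zipIdx.foldl (fun d q => d.modify q.1.1 [] (· ++ [q.2])) PySem.Dict.empty).items
      = (PySem.Set.ofList (genes.map (·.1))).map (fun c => (c, pvGrp (genes.map (·.1)) c 0)) := by
  set d := genes.zipIdx.foldl (fun d q => d.modify q.1.1 [] (· ++ [q.2])) PySem.Dict.empty with hd
  have hkeys : d.keys = PySem.Set.ofList (genes.map (·.1)) := by
    rw [hd, PySem.Dict.keys_foldl_modify_key genes.zipIdx (fun q => q.1.1) [] (fun d q v => v ++ [q.2])]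
    rw [PySem.Dict.keys_empty]
    have : genes.zipIdx.map (fun q => q.1.1) = genes.map (·.1) := by
      rw [show (fun (q : (String × String) × Nat) => q.1.1) = (·.1) ∘ (Prod.fst) from rfl,
        ← List.map_map, List.zipIdx_map_fst]
    rw [this]; rfl
  have hnd : d.keys.Nodup := by rw [hkeys]; exact PySem.Set.nodup_ofList _
  rw [PySem.Dict.items_eq_map_keys d hnd [], hkeys]
  apply List.map_congr_left
  intro c _
  rw [← pvPositions_getD genes c, hd]

-- one pass of B's outer loop, over any list of contig ids
theorem pvFoldGroups (contig_info : List (String × List String)) (ids : List String) :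
    ∀ (ks : List String) (L : List String), L.length = ids.length →
    (ks.foldl (fun names c =>
      ((pvGrp ids c 0).zipIdx 1).foldl
        (fun nm np => nm.set np.1 (pvB_name0 contig_info c ++ "_tbb_" ++ PySem.Int.toStr (np.2 : Int))) names) L).length = ids.length ∧
    ∀ (k : Nat) (hk : k < ids.length),
    (ks.foldl (fun names c =>
      ((pvGrp ids c 0).zipIdx 1).foldl
        (fun nm np => nm.set np.1 (pvB_name0 contig_info c ++ "_tbb_" ++ PySem.Int.toStr (np.2 : Int))) names) L)[k]? =
      if ids[k] ∈ ks then
        some (pvB_name0 contig_info ids[k] ++ "_tbb_" ++ PySem.Int.toStr ((1 + (ids.take k).count ids[k] : Nat) : Int))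
      else L[k]? := by
  intro ks
  induction ks with
  | nil => intro L hL; exact ⟨hL, fun k hk => by simp⟩
  | cons c ks ih =>
    intro L hL
    have hbd : ∀ p ∈ pvGrp ids c 0, p < L.length := by
      intro p hp; rw [hL]; simpa using (pvGrp_bounds c ids 0 p hp).2
    obtain ⟨slen, sget⟩ := pvScatter
      (fun j => pvB_name0 contig_info c ++ "_tbb_" ++ PySem.Int.toStr (j : Int))
      (pvGrp ids c 0) 1 L (pvGrp_nodup c ids 0) hbd
    simp only [List.foldl_cons]
    obtain ⟨ihlen, ihget⟩ := ih _ (by rw [slen, hL])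
    refine ⟨ihlen, ?_⟩
    intro k hk
    rw [ihget k hk]
    by_cases hks : ids[k] ∈ ks
    · simp [hks]
    · rw [sget k]
      by_cases hkc : ids[k] = c
      · have hmem : k ∈ pvGrp ids c 0 := by
          have := (pvGrp_mem_iff c ids 0 k hk).2 hkc
          simpa using this
        have hidx : (pvGrp ids c 0).idxOf k = (ids.take k).count c := by
          have := pvGrp_idxOf c ids 0 k hk hkc
          simpa using this
        rw [if_neg hks, if_pos hmem, hidx, if_pos (show ids[k] ∈ c :: ks by simp [hkc])]
        simp [hkc]
      · have hmem : k ∉ pvGrp ids c 0 := by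
          intro h
          exact hkc ((pvGrp_mem_iff c ids 0 k hk).1 (by simpa using h))
        rw [if_neg hks, if_neg hmem, if_neg (by simp [List.mem_cons]; exact ⟨hkc, hks⟩)]

-- ===== VERDICT (by name: the statement is the Claim_ definition above) =====
theorem build_gene_names_py_spec : Claim_equal_build_gene_names_py := by
  intro genes contig_info _ _
  unfold Spec_build_gene_names_py build_gene_names_py build_gene_names_py_alt
  set ids := genes.map (·.1) with hids
  have hA := pvA_loop contig_info genes [] [] PySem.Dict.empty (by intro c; simp)
  rw [hA, List.nil_append]
  dsimp only
  rw [pvPositions_items genes, List.foldl_map]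
  obtain ⟨blen, bget⟩ := pvFoldGroups contig_info ids (PySem.Set.ofList ids)
    (List.replicate genes.length "") (by simp [hids])
  apply List.ext_getElem?
  intro k
  rw [pvNm_getElem? contig_info ids [] k]
  by_cases hk : k < ids.length
  · rw [bget k hk, if_pos ((PySem.Set.mem_ofList ids ids[k]).2 (by simp))]
    rw [List.getElem?_eq_getElem hk]
    simp only [Option.map_some, List.nil_append]
    congr 3
    push_cast
    ring
  · rw [List.getElem?_eq_none (by omega), Option.map_none]
    rw [List.getElem?_eq_none (by rw [blen]; omega)]
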